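-- pv_equiv track=rewrite | github.com/aagrawal207/Artificial-Intelligence-Lab | Lab-3-Deduction-Theorem/deduction_theorem.py | replace_negation
-- ===== SOURCE A (Python) =====
-- def replace_negation(expr, inner_expr, count):
--     for i in range(2):
--         pos = 0
--         for c in expr:
--             if c == '~':
--                 inner_expr[count] = (expr[pos + 1:pos + 2], "F")
--                 expr = expr[:pos] + str(count) + expr[pos+2:]
--                 count += 1
--                 break
--             pos += 1
--     return expr, inner_expr, count
-- ===== SOURCE B (Python) =====
-- def replace_negation(expr, inner_expr, count):
--     buf = []
--     r = 0
--     i = 0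
--     n = len(expr)
--     while i < n:
--         c = expr[i]
--         if c == '~' and r < 2:
--             inner_expr[count] = (expr[i + 1:i + 2], "F")
--             buf.append(str(count))
--             count += 1
--             r += 1
--             i += 2
--         else:
--             buf.append(c)
--             i += 1
--     return ''.join(buf), inner_expr, count
-- ===== Notes on version B (the rewrite author's own statement) =====
-- stated objective: alternative
-- what changed: Single left-to-right indexed scan with a replacement counter capped at 2, building the result in a list buffer, instead of two restarting find-the-first-'~' passes each rebuilding the string from slices.
import Mathlib
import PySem

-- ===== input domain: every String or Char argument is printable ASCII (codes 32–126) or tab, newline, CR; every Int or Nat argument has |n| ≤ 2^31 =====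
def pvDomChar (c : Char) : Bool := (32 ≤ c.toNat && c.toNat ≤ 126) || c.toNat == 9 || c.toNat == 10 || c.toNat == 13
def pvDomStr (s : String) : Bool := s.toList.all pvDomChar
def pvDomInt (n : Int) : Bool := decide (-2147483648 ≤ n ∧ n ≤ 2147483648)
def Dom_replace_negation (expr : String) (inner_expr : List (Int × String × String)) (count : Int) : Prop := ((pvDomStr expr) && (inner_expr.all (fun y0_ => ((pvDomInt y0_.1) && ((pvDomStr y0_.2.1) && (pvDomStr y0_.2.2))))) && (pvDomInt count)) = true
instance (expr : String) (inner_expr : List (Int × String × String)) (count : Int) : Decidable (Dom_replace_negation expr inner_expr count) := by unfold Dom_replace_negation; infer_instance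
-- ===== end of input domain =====

-- B replaces A's two restarting find-and-rebuild passes by one left-to-right scan with a
-- replacement counter capped at 2; same return value (inner_expr is a dict A mutates in place,
-- B performs the same insertions; the proved equivalence is about the returned triple).

-- ===== PORT A =====
-- inner 'for c in expr' loop of one pass: scans with the running pos, and on the first '~'
-- performs the dict store, the slice-rebuild of expr and count += 1, then breaks.
def pvAScan (cs : List Char) (pos : Int) (expr : List Char)
    (inner : PySem.Dict Int (String × String)) (count : Int) :
    List Char × PySem.Dict Int (String × String) × Int :=
  match cs with
  | [] => (expr, inner, count)
  | c :: rest =>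
    if c = '~' then
      (PySem.List.slice expr none (some pos) ++ PySem.Int.toChars count
         ++ PySem.List.slice expr (some (pos + 2)) none,
       inner.insert count (String.ofList (PySem.List.slice expr (some (pos + 1)) (some (pos + 2))), "F"),
       count + 1)
    else pvAScan rest (pos + 1) expr inner count

def replace_negation (expr : String) (inner_expr : List (Int × String × String)) (count : Int) : String × (List (Int × String × String)) × Int :=
  -- for i in range(2): two unrolled passes, each restarting the scan on the current expr
  let s0 := expr.toList
  let r1 := pvAScan s0 0 s0 (PySem.Dict.mk inner_expr) count
  let r2 := pvAScan r1.1 0 r1.1 r1.2.1 r1.2.2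
  (String.ofList r2.1, r2.2.1.items, r2.2.2)

-- ===== PORT B =====
-- the while loop of Source B: cs is the part of expr from the current index i on, so
-- expr[i+1:i+2] is rest.take 1 (exact: [] at the end) and 'i += 2' drops one more char.
def pvBScan (cs : List Char) (r : Nat)
    (inner : PySem.Dict Int (String × String)) (count : Int) (buf : List Char) :
    List Char × PySem.Dict Int (String × String) × Int :=
  match cs with
  | [] => (buf, inner, count)
  | c :: rest =>
    if c = '~' ∧ r < 2 then
      pvBScan rest.tail (r + 1)
        (inner.insert count (String.ofList (rest.take 1), "F")) (count + 1)
        (buf ++ PySem.Int.toChars count)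
    else pvBScan rest r inner count (buf ++ [c])
termination_by cs.length
decreasing_by
  all_goals simp [List.length_tail]

def replace_negation_alt (expr : String) (inner_expr : List (Int × String × String)) (count : Int) : String × (List (Int × String × String)) × Int :=
  let r := pvBScan expr.toList 0 (PySem.Dict.mk inner_expr) count []
  (String.ofList r.1, r.2.1.items, r.2.2)

-- ===== PRECONDITION & SPEC =====
def Spec_replace_negation (expr : String) (inner_expr : List (Int × String × String)) (count : Int) (out : String × (List (Int × String × String)) × Int) : Prop := out = replace_negation_alt expr inner_expr count
instance (expr : String) (inner_expr : List (Int × String × String)) (count : Int) (out : String × (List (Int × String × String)) × Int) : Decidable (Spec_replace_negation expr inner_expr count out) := by unfold Spec_replace_negation; infer_instance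

-- ===== CLAIM (what is proved, stated in full; the proofs are below) =====
def Claim_equal_replace_negation : Prop := ∀ (expr : String) (inner_expr : List (Int × String × String)) (count : Int), Dom_replace_negation expr inner_expr count → Spec_replace_negation expr inner_expr count (replace_negation expr inner_expr count)

-- ===== LEMMAS AND PROOFS =====

-- str(count) never contains '~'
lemma pvDigitChar_ne : ∀ k : Nat, Nat.digitChar k ≠ '~'
  | 0 | 1 | 2 | 3 | 4 | 5 | 6 | 7 | 8 | 9 | 10 | 11 | 12 | 13 | 14 | 15 => by decide
  | (_ + 16) => by simp [Nat.digitChar]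

lemma pvNoTildeCore (f : Nat) : ∀ (n : Nat) (acc : List Char),
    '~' ∉ acc → '~' ∉ Nat.toDigitsCore 10 f n acc := by
  induction f with
  | zero => intro n acc h; simpa [Nat.toDigitsCore] using h
  | succ f ih =>
    intro n acc h
    simp only [Nat.toDigitsCore]
    split
    · intro hm
      rcases List.mem_cons.mp hm with h1 | h1
      · exact pvDigitChar_ne _ h1.symm
      · exact h h1
    · refine ih _ _ ?_
      intro hm
      rcases List.mem_cons.mp hm with h1 | h1
      · exact pvDigitChar_ne _ h1.symm
      · exact h h1

lemma pvNoTildeToChars (n : Int) : '~' ∉ PySem.Int.toChars n := by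
  unfold PySem.Int.toChars
  split
  · intro hm
    rcases List.mem_cons.mp hm with h1 | h1
    · exact absurd h1 (by decide)
    · exact pvNoTildeCore _ _ _ (by simp) h1
  · exact pvNoTildeCore _ _ _ (by simp)

-- splitting a char list at its first '~'
lemma pvSplitTilde (l : List Char) :
    '~' ∉ l ∨ ∃ p q, l = p ++ '~' :: q ∧ '~' ∉ p := by
  induction l with
  | nil => left; simp
  | cons c rest ih =>
    by_cases hc : c = '~'
    · right; exact ⟨[], rest, by simp [hc], by simp⟩
    · rcases ih with h | ⟨p, q, rfl, hp⟩
      · left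
        intro hm
        rcases List.mem_cons.mp hm with h1 | h1
        · exact hc h1.symm
        · exact h h1
      · right
        refine ⟨c :: p, q, by simp, ?_⟩
        intro hm
        rcases List.mem_cons.mp hm with h1 | h1
        · exact hc h1.symm
        · exact hp h1

-- A's inner scan: no '~' found
lemma pvAScan_no_tilde (cs : List Char) (pos : Int) (expr : List Char)
    (inner : PySem.Dict Int (String × String)) (count : Int) (h : '~' ∉ cs) :
    pvAScan cs pos expr inner count = (expr, inner, count) := by
  induction cs generalizing pos with
  | nil => rfl
  | cons c rest ih =>
    rw [pvAScan, if_neg (by intro hc; exact h (by simp [hc]))]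
    exact ih pos.succ (fun hm => h (List.mem_cons_of_mem _ hm))

-- A's inner scan: first '~' at offset p.length from pos
lemma pvAScan_find (p : List Char) : ∀ (q : List Char) (pos : Int) (expr : List Char)
    (inner : PySem.Dict Int (String × String)) (count : Int), '~' ∉ p →
    pvAScan (p ++ '~' :: q) pos expr inner count =
      (PySem.List.slice expr none (some (pos + p.length)) ++ PySem.Int.toChars count
         ++ PySem.List.slice expr (some (pos + p.length + 2)) none,
       inner.insert count
         (String.ofList (PySem.List.slice expr (some (pos + p.length + 1)) (some (pos + p.length + 2))), "F"),
       count + 1) := by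
  induction p with
  | nil =>
    intro q pos expr inner count _
    simp [pvAScan]
  | cons c rest ih =>
    intro q pos expr inner count hp
    have hc : c ≠ '~' := by intro hc; exact hp (by simp [hc])
    rw [List.cons_append, pvAScan, if_neg hc,
      ih q (pos + 1) expr inner count (fun hm => hp (List.mem_cons_of_mem _ hm))]
    have h1 : pos + 1 + (rest.length : Int) = pos + ((c :: rest).length : Int) := by
      simp; ring
    rw [h1]

-- A's scan applied to the whole string, explicit split form
lemma pvAScan_split (p q : List Char)
    (inner : PySem.Dict Int (String × String)) (count : Int) (hp : '~' ∉ p) :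
    pvAScan (p ++ '~' :: q) 0 (p ++ '~' :: q) inner count =
      (p ++ PySem.Int.toChars count ++ q.tail,
       inner.insert count (String.ofList (q.take 1), "F"), count + 1) := by
  rw [pvAScan_find p q 0 _ inner count hp]
  have e1 : PySem.List.slice (p ++ '~' :: q) none (some ((0 : Int) + p.length)) = p := by
    rw [zero_add, PySem.List.slice_to_natCast, List.take_left]
  have e2 : PySem.List.slice (p ++ '~' :: q) (some ((0 : Int) + p.length + 2)) none = q.tail := by
    have : (0 : Int) + p.length + 2 = ((p.length + 2 : Nat) : Int) := by push_cast; ring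
    rw [this, PySem.List.slice_from_natCast]
    simp [List.drop_append, List.drop_one]
  have e3 : PySem.List.slice (p ++ '~' :: q) (some ((0 : Int) + p.length + 1))
      (some ((0 : Int) + p.length + 2)) = q.take 1 := by
    have h1 : (0 : Int) + p.length + 1 = ((p.length + 1 : Nat) : Int) := by push_cast; ring
    have h2 : (0 : Int) + p.length + 2 = (((p.length + 1) + 1 : Nat) : Int) := by push_cast; ring
    rw [h1, h2, PySem.List.slice_natCast]
    have : (p ++ '~' :: q).drop (p.length + 1) = q := by simp [List.drop_append]
    rw [this]
    congr 1
    omega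
  rw [e1, e2, e3]

-- B's scan: copying a '~'-free prefix
lemma pvBScan_copy (p : List Char) : ∀ (cs : List Char) (r : Nat)
    (inner : PySem.Dict Int (String × String)) (count : Int) (buf : List Char), '~' ∉ p →
    pvBScan (p ++ cs) r inner count buf = pvBScan cs r inner count (buf ++ p) := by
  induction p with
  | nil => intro cs r inner count buf _; simp
  | cons c rest ih =>
    intro cs r inner count buf hp
    have hc : c ≠ '~' := by intro hc; exact hp (by simp [hc])
    rw [List.cons_append, pvBScan, if_neg (by simp [hc]),
      ih cs r inner count (buf ++ [c]) (fun hm => hp (List.mem_cons_of_mem _ hm))]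
    simp

-- B's scan with the cap reached: pure copy
lemma pvBScan_done (cs : List Char) : ∀ (inner : PySem.Dict Int (String × String))
    (count : Int) (buf : List Char),
    pvBScan cs 2 inner count buf = (buf ++ cs, inner, count) := by
  induction cs with
  | nil => intro inner count buf; simp [pvBScan]
  | cons c rest ih =>
    intro inner count buf
    rw [pvBScan, if_neg (by simp), ih]
    simp

-- B's scan on a '~'-free remainder: pure copy
lemma pvBScan_no_tilde (cs : List Char) : ∀ (r : Nat) (inner : PySem.Dict Int (String × String))
    (count : Int) (buf : List Char), '~' ∉ cs →
    pvBScan cs r inner count buf = (buf ++ cs, inner, count) := by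
  induction cs with
  | nil => intro r inner count buf _; simp [pvBScan]
  | cons c rest ih =>
    intro r inner count buf h
    have hc : c ≠ '~' := by intro hc; exact h (by simp [hc])
    rw [pvBScan, if_neg (by simp [hc]), ih r _ _ _ (fun hm => h (List.mem_cons_of_mem _ hm))]
    simp

lemma pvNoTilde_append {a b : List Char} (ha : '~' ∉ a) (hb : '~' ∉ b) : '~' ∉ a ++ b := by
  intro hm
  rcases List.mem_append.mp hm with h | h
  · exact ha h
  · exact hb h

-- ===== VERDICT (by name: the statement is the Claim_ definition above) =====
theorem replace_negation_spec : Claim_equal_replace_negation := by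
  intro expr inner_expr count _
  unfold Spec_replace_negation replace_negation replace_negation_alt
  dsimp only
  rcases pvSplitTilde expr.toList with h0 | ⟨p, q, hl, hp⟩
  · -- no '~' at all: both passes of A are no-ops, B copies everything
    rw [pvAScan_no_tilde _ _ _ _ _ h0, pvAScan_no_tilde _ _ _ _ _ h0,
      pvBScan_no_tilde _ _ _ _ _ h0]
    rfl
  · rw [hl, pvAScan_split p q _ count hp, pvBScan_copy p _ 0 _ count [] hp]
    rw [pvBScan, if_pos (by simp)]
    have hds := pvNoTildeToChars count
    rcases pvSplitTilde q.tail with h1 | ⟨p2, q2, hq, hp2⟩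
    · -- exactly one replacement: A's second pass finds no '~'
      have hno : '~' ∉ p ++ PySem.Int.toChars count ++ q.tail :=
        pvNoTilde_append (pvNoTilde_append hp hds) h1
      rw [pvAScan_no_tilde _ _ _ _ _ hno, pvBScan_no_tilde _ _ _ _ _ h1]
      simp
    · -- two replacements
      have hpre : '~' ∉ p ++ PySem.Int.toChars count ++ p2 :=
        pvNoTilde_append (pvNoTilde_append hp hds) hp2
      have hassoc : p ++ PySem.Int.toChars count ++ q.tail =
          (p ++ PySem.Int.toChars count ++ p2) ++ '~' :: q2 := by
        rw [hq]; simp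
      rw [hassoc, pvAScan_split _ q2 _ _ hpre, hq,
        pvBScan_copy p2 _ 1 _ _ _ hp2, pvBScan, if_pos (by simp), pvBScan_done]
      simp
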